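-- pv_equiv track=rewrite | github.com/theodwya/theodwya-codecrafters-shell-python | app/main.py | handle_unquoted_backslashes
-- ===== SOURCE A (Python) =====
-- def handle_unquoted_backslashes(token):
--     """Handles backslashes in unquoted text."""
--     processed = []
--     i = 0
--     while i < len(token):
--         if token[i] == "\\" and i + 1 < len(token):
--             # Keep the literal value of the next character
--             processed.append(token[i+1])
--             i += 2
--         else:
--             processed.append(token[i])
--             i += 1
--     return "".join(processed)
-- ===== SOURCE B (Python) =====
-- def handle_unquoted_backslashes(token):
--     """Handles backslashes in unquoted text (run-length rewrite).
--
--     Each maximal run of k backslashes contributes k//2 literal backslashes,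
--     then the character following the run is kept literally (it is escaped
--     iff k is odd, but it is emitted either way); a run ending the token
--     contributes (k+1)//2 backslashes (a trailing lone backslash survives).
--     """
--     out = []
--     i, n = 0, len(token)
--     while i < n:
--         j = i
--         while j < n and token[j] == "\\":
--             j += 1
--         k = j - i
--         if j < n:
--             out.append("\\" * (k // 2) + token[j])
--             i = j + 1
--         else:
--             out.append("\\" * ((k + 1) // 2))
--             i = j
--     return "".join(out)
-- ===== Notes on version B (the rewrite author's own statement) =====
-- stated objective: alternative
-- what changed: Replaces A's per-character escape scan (look at each char, consume the next one after a backslash) by run-length arithmetic: find each maximal run of k backslashes with an inner scan, emit k//2 literal backslashes plus the character following the run, and (k+1)//2 backslashes for a run ending the token.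
import Mathlib
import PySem

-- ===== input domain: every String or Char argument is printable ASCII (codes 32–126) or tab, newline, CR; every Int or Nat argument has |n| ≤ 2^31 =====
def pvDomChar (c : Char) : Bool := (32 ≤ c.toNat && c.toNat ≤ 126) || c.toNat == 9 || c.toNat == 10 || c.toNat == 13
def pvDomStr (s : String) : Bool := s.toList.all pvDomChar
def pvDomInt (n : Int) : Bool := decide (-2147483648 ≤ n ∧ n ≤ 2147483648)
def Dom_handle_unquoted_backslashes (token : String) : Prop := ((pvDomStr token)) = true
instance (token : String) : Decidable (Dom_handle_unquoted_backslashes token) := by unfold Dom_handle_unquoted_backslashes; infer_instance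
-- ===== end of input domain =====

-- B replaces A's per-character escape scan by run-length arithmetic on maximal backslash runs ('alternative'); equal on all inputs.

-- ===== PORT A =====
-- A's while loop: at index i, a backslash with a following char emits that char and steps by 2,
-- otherwise the char itself is emitted and i steps by 1; transcribed as two-step list recursion.
def pvGoA : List Char → List Char
  | [] => []
  | [c] => [c]
  | c :: c2 :: rest =>
    if c = '\\' then c2 :: pvGoA rest
    else c :: pvGoA (c2 :: rest)

def handle_unquoted_backslashes (token : String) : String :=
  String.ofList (pvGoA token.toList)

-- ===== PORT B =====
-- B's outer while loop: the inner 'while token[j] == \\' counting loop is takeWhile/dropWhile,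
-- '\\' * (k // 2) is List.replicate (k / 2) '\\'; a run followed by a char emits k/2 backslashes
-- plus that char and continues after it, a run ending the token emits (k+1)/2 backslashes.
def pvRunB (l : List Char) : List Char :=
  let k := (l.takeWhile (fun c => c == '\\')).length
  match h : l.dropWhile (fun c => c == '\\') with
  | [] => List.replicate ((k + 1) / 2) '\\'
  | d :: tl => List.replicate (k / 2) '\\' ++ d :: pvRunB tl
termination_by l.length
decreasing_by
  have h1 : (l.dropWhile (fun c => c == '\\')).length ≤ l.length :=
    List.length_dropWhile_le _ _
  rw [h] at h1
  simpa using Nat.lt_of_lt_of_le (Nat.lt_succ_self _) h1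

def handle_unquoted_backslashes_alt (token : String) : String :=
  String.ofList (pvRunB token.toList)

-- ===== PRECONDITION & SPEC =====
def Spec_handle_unquoted_backslashes (token : String) (out : String) : Prop := out = handle_unquoted_backslashes_alt token
instance (token : String) (out : String) : Decidable (Spec_handle_unquoted_backslashes token out) := by unfold Spec_handle_unquoted_backslashes; infer_instance

-- ===== CLAIM (what is proved, stated in full; the proofs are below) =====
def Claim_equal_handle_unquoted_backslashes : Prop := ∀ (token : String), Dom_handle_unquoted_backslashes token → Spec_handle_unquoted_backslashes token (handle_unquoted_backslashes token)

-- ===== LEMMAS AND PROOFS =====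

theorem pvRunB_nil : pvRunB [] = [] := by simp [pvRunB]

theorem pvRunB_cons_ne (c : Char) (l : List Char) (hc : ¬ c = '\\') :
    pvRunB (c :: l) = c :: pvRunB l := by
  have hb : (c == '\\') = false := by simp [hc]
  rw [pvRunB]
  split
  · next h =>
      rw [List.dropWhile_cons, if_neg (by simp [hb])] at h
      exact absurd h (by simp)
  · next d tl h =>
      rw [List.dropWhile_cons, if_neg (by simp [hb])] at h
      injection h with h1 h2
      subst h1; subst h2
      simp [hb]

theorem pvRunB_bs_bs (l : List Char) :
    pvRunB ('\\' :: '\\' :: l) = '\\' :: pvRunB l := by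
  rw [pvRunB, pvRunB]
  simp only [List.takeWhile, List.dropWhile, beq_self_eq_true, List.length_cons]
  cases h : l.dropWhile (fun c => c == '\\') with
  | nil =>
    have : ((l.takeWhile fun c => c == '\\').length + 1 + 1 + 1) / 2
        = ((l.takeWhile fun c => c == '\\').length + 1) / 2 + 1 := by omega
    simp [this, List.replicate_succ]
  | cons d tl =>
    have : ((l.takeWhile fun c => c == '\\').length + 1 + 1) / 2
        = (l.takeWhile fun c => c == '\\').length / 2 + 1 := by omega
    simp [this, List.replicate_succ]

theorem pvRunB_bs_single : pvRunB ['\\'] = ['\\'] := by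
  rw [pvRunB]; simp [List.takeWhile, List.dropWhile]

theorem pvRunB_bs_cons_ne (c : Char) (l : List Char) (hc : ¬ c = '\\') :
    pvRunB ('\\' :: c :: l) = c :: pvRunB l := by
  have hb : (c == '\\') = false := by simp [hc]
  rw [pvRunB]
  split
  · next h =>
      rw [List.dropWhile_cons, if_pos (by simp), List.dropWhile_cons,
        if_neg (by simp [hb])] at h
      exact absurd h (by simp)
  · next d tl h =>
      rw [List.dropWhile_cons, if_pos (by simp), List.dropWhile_cons,
        if_neg (by simp [hb])] at h
      injection h with h1 h2
      subst h1; subst h2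
      simp [hb]

theorem pvGoA_eq_pvRunB (l : List Char) : pvGoA l = pvRunB l := by
  induction l using pvGoA.induct with
  | case1 => simp [pvGoA, pvRunB_nil]
  | case2 c =>
    by_cases hc : c = '\\'
    · simp [pvGoA, hc, pvRunB_bs_single]
    · simp [pvGoA, pvRunB_cons_ne c [] hc, pvRunB_nil]
  | case3 c2 rest ih =>
    -- head is '\\', next char exists
    by_cases h2 : c2 = '\\'
    · subst h2
      simpa [pvGoA, pvRunB_bs_bs] using ih
    · simp [pvGoA, pvRunB_bs_cons_ne c2 rest h2, ih]
  | case4 c c2 rest h ih =>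
    simp [pvGoA, h, pvRunB_cons_ne c (c2 :: rest) h, ih]

-- ===== VERDICT (by name: the statement is the Claim_ definition above) =====
theorem handle_unquoted_backslashes_spec : Claim_equal_handle_unquoted_backslashes := by
  intro token _
  unfold Spec_handle_unquoted_backslashes handle_unquoted_backslashes handle_unquoted_backslashes_alt
  rw [pvGoA_eq_pvRunB]
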